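-- pv_equiv track=rewrite | github.com/RumbleDB/hep-iris-benchmark-scripts | asterixdb2common.py | summarize_net_stats
-- ===== SOURCE A (Python) =====
-- def summarize_net_stats(stats):
--     res = {}
--     for node_id, node_stats in stats.items():
--         for metric in node_stats:
--             if metric not in res:
--                 res[metric] = 0
--             res[metric] += node_stats[metric]
--     return res
-- ===== SOURCE B (Python) =====
-- def summarize_net_stats(stats):
--     # Column-wise aggregation over the flattened (metric, value) pairs:
--     # metric keys in first-appearance order, each metric's value column
--     # grouped into a list, result = one sum per column.
--     pairs = [(m, v) for ns in stats.values() for m, v in ns.items()]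
--     keys = list(dict.fromkeys(m for m, _ in pairs))
--     cols = {}
--     for m, v in pairs:
--         cols.setdefault(m, []).append(v)
--     return {m: sum(cols[m]) for m in keys}
-- ===== Notes on version B (the rewrite author's own statement) =====
-- stated objective: alternative
-- what changed: Replaces A's single row-wise pass with a running per-key accumulator dict by a column-wise aggregation over the flattened (metric, value) pair list: compute the distinct metric keys in first-appearance order with dict.fromkeys, group each metric's values into a column list, then produce one sum per column.
import Mathlib
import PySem

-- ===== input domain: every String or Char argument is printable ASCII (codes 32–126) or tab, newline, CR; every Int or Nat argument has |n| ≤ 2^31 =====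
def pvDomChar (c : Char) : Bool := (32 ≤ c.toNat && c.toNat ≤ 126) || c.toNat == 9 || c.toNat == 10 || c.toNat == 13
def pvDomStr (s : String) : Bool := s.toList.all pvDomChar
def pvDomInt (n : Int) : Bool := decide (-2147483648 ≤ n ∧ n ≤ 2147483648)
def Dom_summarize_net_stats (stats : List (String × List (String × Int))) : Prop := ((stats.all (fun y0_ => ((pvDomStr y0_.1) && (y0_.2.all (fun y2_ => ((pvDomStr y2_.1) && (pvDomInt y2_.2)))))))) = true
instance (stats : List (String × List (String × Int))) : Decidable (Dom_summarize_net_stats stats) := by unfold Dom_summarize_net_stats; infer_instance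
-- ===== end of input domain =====

-- B replaces A's single row-wise accumulation by a two-phase column-wise
-- aggregation (collect metric keys in first-appearance order, then sum each
-- column with default 0); objective: alternative decomposition, same cost class.

-- ===== PORT A =====
def summarize_net_stats (stats : List (String × List (String × Int))) : List (String × Int) :=
  ((PySem.Dict.ofList stats).items.foldl
      (fun res p =>
        (PySem.Dict.ofList p.2).items.foldl
          (fun res q => res.modify q.1 0 (· + q.2)) res)
      PySem.Dict.empty).items

-- ===== PORT B =====
def summarize_net_stats_alt (stats : List (String × List (String × Int))) : List (String × Int) :=
  let pairs := (PySem.Dict.ofList stats).values.flatMap (fun ns => (PySem.Dict.ofList ns).items)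
  let keys := PySem.List.dedup (pairs.map (·.1))
  let cols := pairs.foldl (fun d q => d.modify q.1 [] (· ++ [q.2])) PySem.Dict.empty
  keys.map (fun m => (m, (cols.getD m []).sum))

-- ===== PRECONDITION & SPEC =====
def Spec_summarize_net_stats (stats : List (String × List (String × Int))) (out : List (String × Int)) : Prop := out = summarize_net_stats_alt stats
instance (stats : List (String × List (String × Int))) (out : List (String × Int)) : Decidable (Spec_summarize_net_stats stats out) := by unfold Spec_summarize_net_stats; infer_instance

-- ===== CLAIM (what is proved, stated in full; the proofs are below) =====
def Claim_equal_summarize_net_stats : Prop := ∀ (stats : List (String × List (String × Int))), Dom_summarize_net_stats stats → Spec_summarize_net_stats stats (summarize_net_stats stats)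

-- ===== LEMMAS AND PROOFS =====

-- A's accumulating loop, read off per key: default 0 plus the sum of this key's values
lemma getD_foldl_modify_sum (L : List (String × Int)) (d : PySem.Dict String Int) (m : String) :
    (L.foldl (fun res q => res.modify q.1 0 (· + q.2)) d).getD m 0
      = d.getD m 0 + ((L.filter (fun q => q.1 == m)).map (·.2)).sum := by
  induction L generalizing d with
  | nil => simp
  | cons q t ih =>
    simp only [List.foldl_cons, ih, List.filter_cons]
    rw [PySem.Dict.getD_modify]
    by_cases h : q.1 = m
    · subst h
      simp only [beq_self_eq_true, List.map_cons, List.sum_cons, if_pos trivial]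
      ring
    · have hb : ¬ (q.1 == m) = true := fun hb => h (eq_of_beq hb)
      rw [if_neg (fun hm => h hm.symm), if_neg hb]

-- the nested iteration over the nodes' dicts is one pass over the flattened pairs
lemma double_fold {α : Type} (g : α → (String × Int) → α) (init : α)
    (stats : List (String × List (String × Int))) :
    ((PySem.Dict.ofList stats).items.foldl
        (fun res p => (PySem.Dict.ofList p.2).items.foldl g res) init)
      = ((PySem.Dict.ofList stats).values.flatMap
          (fun ns => (PySem.Dict.ofList ns).items)).foldl g init := by
  rw [List.foldl_flatMap, PySem.Dict.values, List.foldl_map]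

-- B's ordered dedup is one Set.update from the empty set
lemma dedup_eq_update (xs : List String) :
    PySem.List.dedup xs = PySem.Set.update PySem.Set.empty xs := by
  rw [PySem.List.dedup_eq_ofList, PySem.Set.ofList_eq_foldl]
  rfl

theorem summarize_net_stats_spec : Claim_equal_summarize_net_stats := by
  unfold Claim_equal_summarize_net_stats Spec_summarize_net_stats
  intro stats _
  unfold summarize_net_stats summarize_net_stats_alt
  dsimp only
  rw [double_fold, dedup_eq_update]
  set pairs := (PySem.Dict.ofList stats).values.flatMap
      (fun ns => (PySem.Dict.ofList ns).items) with hpairs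
  set A := pairs.foldl (fun res q => res.modify q.1 0 (· + q.2)) PySem.Dict.empty with hA
  have hndA : A.keys.Nodup :=
    PySem.Dict.nodup_keys_foldl_modify_key pairs (fun q => q.1) 0 (fun d q v => v + q.2)
      PySem.Dict.empty PySem.Dict.nodup_keys_empty
  have hkA : A.keys = PySem.Set.update PySem.Dict.empty.keys (pairs.map fun q => q.1) :=
    PySem.Dict.keys_foldl_modify_key pairs (fun q => q.1) 0 (fun d q v => v + q.2)
      PySem.Dict.empty
  rw [show ((PySem.Dict.empty : PySem.Dict String Int).keys : List String)
        = (PySem.Set.empty : PySem.Set String) from rfl] at hkA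
  rw [PySem.Dict.items_eq_map_keys A hndA 0, hkA]
  apply List.map_congr_left
  intro m _
  show (m, A.getD m 0)
      = (m, ((pairs.foldl (fun d q => d.modify q.1 [] (· ++ [q.2]))
                PySem.Dict.empty).getD m []).sum)
  congr 1
  rw [hA, getD_foldl_modify_sum, PySem.Dict.getD_foldl_modify_append]
  simp [PySem.Dict.getD, PySem.Dict.get?, PySem.Dict.empty]
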